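-- pv_equiv track=rewrite | github.com/ocean5991/lotter-data | analyze.py | calc_miss
-- ===== SOURCE A (Python) =====
-- def calc_miss(data, front_range=35, back_range=12):
--     """计算遗漏值"""
--     front_miss = {i: 0 for i in range(1, front_range + 1)}
--     back_miss = {i: 0 for i in range(1, back_range + 1)}
--
--     front_last = {i: -1 for i in range(1, front_range + 1)}
--     back_last = {i: -1 for i in range(1, back_range + 1)}
--
--     for idx, item in enumerate(data):
--         for n in item['f']:
--             if front_last[n] != -1:
--                 front_miss[n] = idx - front_last[n]
--             front_last[n] = idx
--
--         for n in item['b']: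
--             if back_last[n] != -1:
--                 back_miss[n] = idx - back_last[n]
--             back_last[n] = idx
--
--     return front_miss, back_miss
-- ===== SOURCE B (Python) =====
-- def calc_miss(data, front_range=35, back_range=12):
--     """计算遗漏值 — per-number occurrence scan instead of running last-seen state"""
--     def occurrences(key, n):
--         return [idx for idx, item in enumerate(data) for m in item[key] if m == n]
--
--     def gap(p):
--         return p[-1] - p[-2] if len(p) >= 2 else 0
--
--     front_miss = {n: gap(occurrences('f', n)) for n in range(1, front_range + 1)}
--     back_miss = {n: gap(occurrences('b', n)) for n in range(1, back_range + 1)}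
--     return front_miss, back_miss
-- ===== Notes on version B (the rewrite author's own statement) =====
-- stated objective: alternative
-- what changed: Replaces the single pass that threads four running miss/last-seen dicts with a per-number decomposition: for each number in range a comprehension collects its occurrence indices over enumerate(data) and the miss is the gap between the last two occurrences (0 otherwise), built directly as a dict comprehension over the range.
import Mathlib
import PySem

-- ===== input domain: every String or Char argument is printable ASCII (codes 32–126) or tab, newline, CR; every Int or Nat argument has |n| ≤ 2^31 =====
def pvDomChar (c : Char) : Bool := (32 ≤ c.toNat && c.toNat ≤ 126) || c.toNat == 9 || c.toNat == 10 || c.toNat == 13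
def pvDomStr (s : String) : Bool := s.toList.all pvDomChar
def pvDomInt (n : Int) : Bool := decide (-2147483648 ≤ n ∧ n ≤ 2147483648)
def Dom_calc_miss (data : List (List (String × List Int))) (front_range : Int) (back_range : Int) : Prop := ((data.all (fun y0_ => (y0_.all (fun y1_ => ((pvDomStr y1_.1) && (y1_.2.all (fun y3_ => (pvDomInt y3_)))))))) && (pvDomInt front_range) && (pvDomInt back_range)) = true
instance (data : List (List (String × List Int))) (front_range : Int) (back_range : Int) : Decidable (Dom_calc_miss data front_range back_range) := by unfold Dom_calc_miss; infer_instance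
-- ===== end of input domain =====

-- B replaces A's running last-seen/miss state with an independent per-number occurrence scan (objective: alternative decomposition, same results).

-- ===== PORT A =====
-- one step of A's inner 'for n in item[key]' loop on the (miss, last) dict pair;
-- front_last[n] is read with default -1: Python raises KeyError there, excluded by Pre_
def pvStepA (idx : Int) (s : PySem.Dict Int Int × PySem.Dict Int Int) (n : Int) :
    PySem.Dict Int Int × PySem.Dict Int Int :=
  (if s.2.getD n (-1) ≠ -1 then s.1.insert n (idx - s.2.getD n (-1)) else s.1,
   s.2.insert n idx)

-- item[key]: first-match association-list lookup; Python raises KeyError on a missing key, excluded by Pre_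
def pvInner (key : String) (p : Int × List (String × List Int))
    (s : PySem.Dict Int Int × PySem.Dict Int Int) :
    PySem.Dict Int Int × PySem.Dict Int Int :=
  ((p.2.lookup key).getD []).foldl (pvStepA p.1) s

-- {i: c for i in range(1, r + 1)}
def pvConstDict (r c : Int) : PySem.Dict Int Int :=
  (PySem.List.pyRange 1 (r + 1)).foldl (fun d i => d.insert i c) PySem.Dict.empty

def calc_miss (data : List (List (String × List Int))) (front_range : Int) (back_range : Int) : (List (Int × Int)) × (List (Int × Int)) :=
  let fin := (PySem.List.enumerate data).foldl
    (fun st p => (pvInner "f" p st.1, pvInner "b" p st.2))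
    ((pvConstDict front_range 0, pvConstDict front_range (-1)),
     (pvConstDict back_range 0, pvConstDict back_range (-1)))
  (fin.1.1.items, fin.2.1.items)

-- ===== PORT B =====
-- [idx for idx, item in enumerate(data) for m in item[key] if m == n]
def pvOcc (data : List (List (String × List Int))) (key : String) (n : Int) : List Int :=
  (PySem.List.enumerate data).flatMap
    (fun p => (((p.2.lookup key).getD []).filter (fun m => m == n)).map (fun _ => p.1))

-- p[-1] - p[-2] if len(p) >= 2 else 0
def pvGap (p : List Int) : Int :=
  if 2 ≤ p.length then PySem.List.pyGetD p (-1) 0 - PySem.List.pyGetD p (-2) 0 else 0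

def calc_miss_alt (data : List (List (String × List Int))) (front_range : Int) (back_range : Int) : (List (Int × Int)) × (List (Int × Int)) :=
  ((PySem.List.pyRange 1 (front_range + 1)).map (fun n => (n, pvGap (pvOcc data "f" n))),
   (PySem.List.pyRange 1 (back_range + 1)).map (fun n => (n, pvGap (pvOcc data "b" n))))

-- ===== PRECONDITION & SPEC =====
-- Python A raises KeyError when an item lacks the 'f' or 'b' key, or when a drawn number
-- lies outside 1..front_range / 1..back_range; exactly those inputs are excluded.
def Pre_calc_miss (data : List (List (String × List Int))) (front_range : Int) (back_range : Int) : Prop :=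
  ∀ item ∈ data,
    (item.lookup "f").isSome ∧ (item.lookup "b").isSome ∧
    (∀ n ∈ (item.lookup "f").getD [], 1 ≤ n ∧ n ≤ front_range) ∧
    (∀ n ∈ (item.lookup "b").getD [], 1 ≤ n ∧ n ≤ back_range)
instance (data : List (List (String × List Int))) (front_range : Int) (back_range : Int) : Decidable (Pre_calc_miss data front_range back_range) := by unfold Pre_calc_miss; infer_instance

def pvWitness_calc_miss : (List (List (String × List Int))) × Int × Int :=
  ([[("f", [1, 3]), ("b", [2])], [("f", [3]), ("b", [2])]], 3, 2)

def Spec_calc_miss (data : List (List (String × List Int))) (front_range : Int) (back_range : Int) (out : (List (Int × Int)) × (List (Int × Int))) : Prop := out = calc_miss_alt data front_range back_range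
instance (data : List (List (String × List Int))) (front_range : Int) (back_range : Int) (out : (List (Int × Int)) × (List (Int × Int))) : Decidable (Spec_calc_miss data front_range back_range out) := by unfold Spec_calc_miss; infer_instance

-- ===== CLAIM (what is proved, stated in full; the proofs are below) =====
def Claim_equal_calc_miss : Prop := ∀ (data : List (List (String × List Int))) (front_range : Int) (back_range : Int), Dom_calc_miss data front_range back_range → Pre_calc_miss data front_range back_range → Spec_calc_miss data front_range back_range (calc_miss data front_range back_range)

-- ===== LEMMAS AND PROOFS =====

-- scalar version of A's per-number state transition
def pvG (s : Int × Int) (idx : Int) : Int × Int :=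
  (if s.2 ≠ -1 then idx - s.2 else s.1, idx)

-- A's fold on one key side over a list of (index, item) pairs
def pvFoldA (key : String) (ps : List (Int × List (String × List Int)))
    (s : PySem.Dict Int Int × PySem.Dict Int Int) :
    PySem.Dict Int Int × PySem.Dict Int Int :=
  ps.foldl (fun st p => pvInner key p st) s

-- occurrence indices of n over an arbitrary pair list
def pvOccP (key : String) (ps : List (Int × List (String × List Int))) (n : Int) : List Int :=
  ps.flatMap (fun p => (((p.2.lookup key).getD []).filter (fun m => m == n)).map (fun _ => p.1))

lemma pvOcc_eq (data : List (List (String × List Int))) (key : String) (n : Int) :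
    pvOcc data key n = pvOccP key (PySem.List.enumerate data) n := rfl

lemma inner_getD (ns : List Int) (idx n : Int)
    (s : PySem.Dict Int Int × PySem.Dict Int Int) :
    (((ns.foldl (pvStepA idx) s).1.getD n 0, (ns.foldl (pvStepA idx) s).2.getD n (-1)))
      = ((ns.filter (fun m => m == n)).map (fun _ => idx)).foldl pvG
          (s.1.getD n 0, s.2.getD n (-1)) := by
  induction ns generalizing s with
  | nil => rfl
  | cons m ns ih =>
    by_cases hmn : m = n
    · subst hmn
      simp only [List.foldl_cons, List.filter_cons, beq_self_eq_true, if_pos, List.map_cons]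
      rw [ih]
      congr 1
      simp only [pvStepA, pvG, PySem.Dict.getD_insert_self]
      by_cases h : s.2.getD m (-1) ≠ -1 <;> simp [h, PySem.Dict.getD_insert_self]
    · have hb : (m == n) = false := by simp [hmn]
      simp only [List.foldl_cons, List.filter_cons, hb, Bool.false_eq_true, if_neg,
        not_false_iff]
      rw [ih]
      congr 1
      simp only [pvStepA]
      by_cases h : s.2.getD m (-1) ≠ -1 <;>
        simp [h, PySem.Dict.getD_insert, Ne.symm hmn]

lemma fold_getD (key : String) (ps : List (Int × List (String × List Int))) (n : Int)
    (s : PySem.Dict Int Int × PySem.Dict Int Int) :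
    (((pvFoldA key ps s).1.getD n 0, (pvFoldA key ps s).2.getD n (-1)))
      = (pvOccP key ps n).foldl pvG (s.1.getD n 0, s.2.getD n (-1)) := by
  induction ps generalizing s with
  | nil => rfl
  | cons p ps ih =>
    simp only [pvFoldA, List.foldl_cons, pvOccP, List.flatMap_cons, List.foldl_append]
    rw [show (List.foldl (fun st p => pvInner key p st) (pvInner key p s) ps)
          = pvFoldA key ps (pvInner key p s) from rfl, ih, pvInner, inner_getD]
    rfl

-- the scalar fold computes (gap, last occurrence)
lemma scalar_fold (o : List Int) (h : ∀ x ∈ o, 0 ≤ x) :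
    o.foldl pvG (0, -1) = (pvGap o, o.getLast?.getD (-1)) := by
  induction o using List.reverseRecOn with
  | nil => rfl
  | append_singleton o a ih =>
    have ho : ∀ x ∈ o, (0:Int) ≤ x := fun x hx => h x (by simp [hx])
    rw [List.foldl_append, ih ho]
    cases o with
    | nil => norm_num [pvG, pvGap]
    | cons y ys =>
      have hlast : (y :: ys).getLast? = some ((y :: ys).getLast (by simp)) := by
        rw [List.getLast?_eq_some_getLast]
      have hmem : (y :: ys).getLast (by simp) ∈ (y :: ys) := List.getLast_mem _
      have hge : (0:Int) ≤ (y :: ys).getLast (by simp) := ho _ hmem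
      have hne : ((y :: ys).getLast?.getD (-1)) ≠ -1 := by
        rw [hlast]; simp; omega
      simp only [List.foldl_cons, List.foldl_nil, pvG]
      rw [if_pos hne]
      have hgap : pvGap ((y :: ys) ++ [a]) = a - (y :: ys).getLast?.getD (-1) := by
        simp only [pvGap]
        have hlen : 2 ≤ ((y :: ys) ++ [a]).length := by simp
        rw [if_pos hlen]
        have h1 : PySem.List.pyGetD ((y :: ys) ++ [a]) (-1) 0 = a := by
          simp [PySem.List.pyGetD, PySem.List.pyGet?, PySem.List.pyIdx?]
        have h2 : PySem.List.pyGetD ((y :: ys) ++ [a]) (-2) 0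
            = (y :: ys).getLast?.getD (-1) := by
          simp only [PySem.List.pyGetD, PySem.List.pyGet?, PySem.List.pyIdx?]
          have hl : ((y :: ys) ++ [a]).length = ys.length + 2 := by simp
          rw [hl]
          norm_num
          rw [show ys.length + 2 - Int.toNat 2 = ys.length by simp]
          rw [← List.cons_append]
          rw [List.getElem?_append_left (by simp)]
          have hsome : (y :: ys)[ys.length]? = some ((y :: ys)[ys.length]) :=
            List.getElem?_eq_getElem (by simp)
          rw [hsome, hlast]
          simp only [Option.getD_some]
          rw [List.getLast_eq_getElem]
          congr 1
        rw [h1, h2]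
      rw [hgap]
      rw [List.getLast?_concat]
      rfl

-- getD over the constant-initialisation fold stays at the constant
lemma getD_const_fold (l : List Int) (c : Int) (d : PySem.Dict Int Int) (n : Int)
    (h : d.getD n c = c) : (l.foldl (fun d i => d.insert i c) d).getD n c = c := by
  induction l generalizing d with
  | nil => exact h
  | cons i l ih =>
    simp only [List.foldl_cons]
    apply ih
    rw [PySem.Dict.getD_insert]
    split <;> simp [h]

lemma getD_pvConstDict (r c n : Int) : (pvConstDict r c).getD n c = c :=
  getD_const_fold _ _ _ _ (PySem.Dict.getD_empty _ _)

lemma keys_pvConstDict (r c : Int) :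
    (pvConstDict r c).keys = PySem.List.pyRange 1 (r + 1) := by
  unfold pvConstDict
  rw [PySem.Dict.keys_foldl_insert _ (fun _ _ => c)]
  rw [PySem.Dict.keys_empty]
  rw [show PySem.Set.update ([] : List Int) (PySem.List.pyRange 1 (r + 1))
        = PySem.Set.ofList (PySem.List.pyRange 1 (r + 1)) by
      rw [PySem.Set.ofList_eq_foldl]; rfl]
  exact PySem.Set.ofList_eq_self_of_nodup _ (PySem.List.nodup_pyRange_one 1 (r + 1))

-- keys of the miss dict are untouched when every occurring number is already a key
lemma keys_inner (ns : List Int) (idx : Int)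
    (s : PySem.Dict Int Int × PySem.Dict Int Int)
    (h : ∀ n ∈ ns, s.1.contains n) :
    (ns.foldl (pvStepA idx) s).1.keys = s.1.keys := by
  induction ns generalizing s with
  | nil => rfl
  | cons m ns ih =>
    have hk : (pvStepA idx s m).1.keys = s.1.keys := by
      simp only [pvStepA]
      split
      · exact PySem.Dict.keys_insert_of_contains _ _ (h m (by simp))
      · rfl
    have h' : ∀ n ∈ ns, (pvStepA idx s m).1.contains n := by
      intro n hn
      rw [PySem.Dict.contains_iff_mem_keys, hk, ← PySem.Dict.contains_iff_mem_keys]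
      exact h n (by simp [hn])
    rw [List.foldl_cons, ih _ h', hk]

lemma keys_fold (key : String) (ps : List (Int × List (String × List Int)))
    (s : PySem.Dict Int Int × PySem.Dict Int Int)
    (h : ∀ p ∈ ps, ∀ n ∈ (p.2.lookup key).getD [], s.1.contains n) :
    (pvFoldA key ps s).1.keys = s.1.keys := by
  induction ps generalizing s with
  | nil => rfl
  | cons p ps ih =>
    have hk : (pvInner key p s).1.keys = s.1.keys :=
      keys_inner _ _ _ (h p (by simp))
    have h' : ∀ q ∈ ps, ∀ n ∈ (q.2.lookup key).getD [], (pvInner key p s).1.contains n := by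
      intro q hq n hn
      rw [PySem.Dict.contains_iff_mem_keys, hk, ← PySem.Dict.contains_iff_mem_keys]
      exact h q (by simp [hq]) n hn
    rw [show pvFoldA key (p :: ps) s = pvFoldA key ps (pvInner key p s) from rfl]
    rw [ih _ h', hk]

lemma enumerate_fst_ge (data : List (List (String × List Int))) (s : Int)
    (p : Int × List (String × List Int)) (hp : p ∈ PySem.List.enumerate data s) :
    s ≤ p.1 := by
  induction data generalizing s with
  | nil => simp [PySem.List.enumerate] at hp
  | cons x xs ih =>
    rw [PySem.List.enumerate_cons] at hp
    rcases List.mem_cons.mp hp with h | h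
    · subst h; exact le_refl _
    · have := ih (s + 1) h; omega

lemma occ_nonneg (data : List (List (String × List Int))) (key : String) (n x : Int)
    (hx : x ∈ pvOcc data key n) : 0 ≤ x := by
  rw [pvOcc] at hx
  rcases List.mem_flatMap.mp hx with ⟨p, hp, hx⟩
  rcases List.mem_map.mp hx with ⟨_, _, rfl⟩
  exact enumerate_fst_ge data 0 p hp

-- one side of the result: A's items list equals B's map over the range
lemma enumerate_mem_snd (data : List (List (String × List Int))) (s : Int)
    (p : Int × List (String × List Int)) (hp : p ∈ PySem.List.enumerate data s) :
    p.2 ∈ data := by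
  induction data generalizing s with
  | nil => simp [PySem.List.enumerate] at hp
  | cons x xs ih =>
    rw [PySem.List.enumerate_cons] at hp
    rcases List.mem_cons.mp hp with h | h
    · subst h; simp
    · exact List.mem_cons_of_mem _ (ih _ h)

lemma side_eq (key : String) (data : List (List (String × List Int))) (r : Int)
    (h : ∀ item ∈ data, ∀ n ∈ (item.lookup key).getD [], 1 ≤ n ∧ n ≤ r) :
    (pvFoldA key (PySem.List.enumerate data) (pvConstDict r 0, pvConstDict r (-1))).1.items
      = (PySem.List.pyRange 1 (r + 1)).map (fun n => (n, pvGap (pvOcc data key n))) := by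
  have hcont : ∀ p ∈ PySem.List.enumerate data 0,
      ∀ n ∈ (p.2.lookup key).getD [], (pvConstDict r 0).contains n := by
    intro p hp n hn
    have hb := h p.2 (enumerate_mem_snd data 0 p hp) n hn
    rw [PySem.Dict.contains_iff_mem_keys, keys_pvConstDict]
    exact PySem.List.mem_pyRange_one.mpr ⟨hb.1, by omega⟩
  have hkeys : (pvFoldA key (PySem.List.enumerate data)
        (pvConstDict r 0, pvConstDict r (-1))).1.keys
      = PySem.List.pyRange 1 (r + 1) := by
    have h0 : (pvFoldA key (PySem.List.enumerate data)
          (pvConstDict r 0, pvConstDict r (-1))).1.keys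
        = (pvConstDict r 0).keys :=
      keys_fold key (PySem.List.enumerate data)
        (pvConstDict r 0, pvConstDict r (-1)) hcont
    rw [h0]; exact keys_pvConstDict r 0
  rw [PySem.Dict.items_eq_map_keys _
    (by rw [hkeys]; exact PySem.List.nodup_pyRange_one 1 (r + 1)) 0]
  rw [hkeys]
  apply List.map_congr_left
  intro n hn
  have hpair := fold_getD key (PySem.List.enumerate data) n
    (pvConstDict r 0, pvConstDict r (-1))
  rw [getD_pvConstDict, getD_pvConstDict, ← pvOcc_eq] at hpair
  rw [scalar_fold _ (occ_nonneg data key n)] at hpair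
  have hfst := congrArg Prod.fst hpair
  simp only at hfst
  rw [hfst]

-- ===== VERDICT (by name: the statement is the Claim_ definition above) =====
theorem calc_miss_spec : Claim_equal_calc_miss := by
  intro data front_range back_range _hdom hpre
  unfold Spec_calc_miss calc_miss calc_miss_alt
  rw [PySem.List.foldl_prod_mk (f := fun s p => pvInner "f" p s)
        (g := fun s p => pvInner "b" p s)]
  refine Prod.ext ?_ ?_
  · exact side_eq "f" data front_range (fun item hi => (hpre item hi).2.2.1)
  · exact side_eq "b" data back_range (fun item hi => (hpre item hi).2.2.2)
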